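-- pv_equiv track=rewrite | github.com/YaoChungLiang/CSE417 | hw7_RNA.py | pair_table
-- ===== SOURCE A (Python) =====
-- def opt(start, end ,sequence):
--     with_pair=0
--     no_pair=0
--     potential_t_comparer=[]
--     if start >=  (end-4) :
--         return 0
--     else:
--         no_pair=opt(start,end-1,sequence)
--         for t in range(start,end-4):
--             if sequence[t]+sequence[end]==0:
--                 potential_t_comparer+=[opt(start,t-1,sequence)+1+opt(t+1,end-1,sequence)]
--             else:
--                 potential_t_comparer.append(0)
--     with_pair = max(potential_t_comparer)
--     return max(no_pair,with_pair)
--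
-- def pair_table(sequence):
--     size_of_table = len(sequence)
--     w = size_of_table
--     h = size_of_table
--     table = [[0 for x in range(w)] for y in range(h)]
--     for k in range(4,len(sequence)):
--         for i in range(0,len(sequence)-k):
--             j=i+k
--             table[i][j]=opt(i,j,sequence)
--     return table
-- ===== SOURCE B (Python) =====
-- def pair_table(sequence):
--     # Bottom-up interval DP (O(n^3)) instead of A's exponential recursion;
--     # rows are built back-to-front without mutation.
--     n = len(sequence)
--     rows = []  # rows i+1 .. n-1 of the finished table
--     for i in range(n - 1, -1, -1):
--         row = []
--         for j in range(n):
--             if i >= j - 4: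
--                 row.append(0)
--             else:
--                 best = row[j - 1]
--                 for t in range(i, j - 4):
--                     if sequence[t] + sequence[j] == 0:
--                         left = row[t - 1] if i < t else 0
--                         best = max(best, left + 1 + rows[t - i][j - 1])
--                 row.append(best)
--         rows = [row] + rows
--     return rows
-- ===== Notes on version B (the rewrite author's own statement) =====
-- stated objective: faster
-- what changed: Replaced A's exponential top-down recursion opt(i,j) (recomputed for every cell with no memoization) by a single bottom-up interval DP that builds the rows of the table back-to-front, each cell read from already-computed cells.
import Mathlib
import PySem

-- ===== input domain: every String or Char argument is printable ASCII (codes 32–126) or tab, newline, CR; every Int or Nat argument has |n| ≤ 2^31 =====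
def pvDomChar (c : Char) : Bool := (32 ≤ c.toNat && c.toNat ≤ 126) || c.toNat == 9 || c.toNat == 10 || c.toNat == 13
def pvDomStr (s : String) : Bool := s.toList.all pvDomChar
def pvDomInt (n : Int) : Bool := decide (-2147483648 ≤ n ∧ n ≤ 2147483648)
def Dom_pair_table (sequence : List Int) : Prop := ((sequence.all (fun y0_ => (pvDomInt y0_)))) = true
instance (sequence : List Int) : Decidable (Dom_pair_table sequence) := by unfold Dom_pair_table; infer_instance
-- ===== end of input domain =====

-- B replaces A's unmemoized exponential recursion by a bottom-up interval DP that
-- builds the table rows back-to-front (objective: faster).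

-- ===== PORT A =====
-- port of A's helper opt(start, end, sequence); all reads are in range on A's calls, ported with pyGetD
def optA (seq : List Int) (s e : Int) : Int :=
  if s ≥ e - 4 then 0
  else
    let no_pair := optA seq s (e - 1)
    let pot := (PySem.List.pyRange s (e - 4) 1).attach.map (fun t =>
      if PySem.List.pyGetD seq t.1 0 + PySem.List.pyGetD seq e 0 = 0 then
        optA seq s (t.1 - 1) + 1 + optA seq (t.1 + 1) (e - 1)
      else 0)
    max no_pair ((PySem.List.max? pot (fun y => y)).getD 0)
termination_by (e - s).toNat
decreasing_by
  · omega
  · have := (PySem.List.mem_pyRange_one.mp t.2); omega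
  · have := (PySem.List.mem_pyRange_one.mp t.2); omega

def pair_table (sequence : List Int) : List (List Int) :=
  let n := sequence.length
  let table : List (List Int) := (List.range n).map (fun _ => (List.range n).map (fun _ => (0 : Int)))
  (PySem.List.pyRange 4 (n : Int) 1).foldl (fun table k =>
    (PySem.List.pyRange 0 ((n : Int) - k) 1).foldl (fun table i =>
      table.modify i.toNat (fun r => r.set (i + k).toNat (optA sequence i (i + k)))) table) table

-- ===== PORT B =====
-- one cell of the DP: `row` is the part of the current row already built, `rows` the rows below
def altCell (seq : List Int) (rows : List (List Int)) (row : List Int) (i j : Int) : Int :=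
  if i ≥ j - 4 then 0
  else
    (PySem.List.pyRange i (j - 4) 1).foldl (fun b t =>
      if PySem.List.pyGetD seq t 0 + PySem.List.pyGetD seq j 0 = 0 then
        max b ((if i < t then PySem.List.pyGetD row (t - 1) 0 else 0) + 1 +
               PySem.List.pyGetD (PySem.List.pyGetD rows (t - i) []) (j - 1) 0)
      else b)
      (PySem.List.pyGetD row (j - 1) 0)

def altRow (seq : List Int) (rows : List (List Int)) (i : Int) : List Int :=
  (PySem.List.pyRange 0 (seq.length : Int) 1).foldl
    (fun row j => row ++ [altCell seq rows row i j]) []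

def pair_table_alt (sequence : List Int) : List (List Int) :=
  (PySem.List.pyRange ((sequence.length : Int) - 1) (-1) (-1)).foldl
    (fun rows i => altRow sequence rows i :: rows) []

-- ===== PRECONDITION & SPEC =====
def Spec_pair_table (sequence : List Int) (out : List (List Int)) : Prop := out = pair_table_alt sequence
instance (sequence : List Int) (out : List (List Int)) : Decidable (Spec_pair_table sequence out) := by unfold Spec_pair_table; infer_instance

-- ===== CLAIM (what is proved, stated in full; the proofs are below) =====
def Claim_equal_pair_table : Prop := ∀ (sequence : List Int), Dom_pair_table sequence → Spec_pair_table sequence (pair_table sequence)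

-- ===== LEMMAS AND PROOFS =====

lemma optA_base (seq : List Int) (s e : Int) (h : s ≥ e - 4) : optA seq s e = 0 := by
  rw [optA]; simp [h]

lemma optA_nonneg (seq : List Int) (s e : Int) : 0 ≤ optA seq s e := by
  have H : ∀ (N : Nat) (s e : Int), (e - s).toNat ≤ N → 0 ≤ optA seq s e := by
    intro N
    induction N with
    | zero => intro s e h; rw [optA_base seq s e (by omega)]
    | succ N ih =>
      intro s e h
      rw [optA]
      split
      · exact le_rfl
      · exact le_trans (ih s (e - 1) (by omega)) (le_max_left _ _)
  exact H (e - s).toNat s e le_rfl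

lemma foldl_max_comm (X : List Int) : ∀ a np : Int, max np (X.foldl max a) = X.foldl max (max np a) := by
  induction X with
  | nil => intro a np; rfl
  | cons x X ih =>
    intro a np
    simp only [List.foldl_cons]
    rw [ih (max a x) np, Int.max_assoc]

lemma getD_max?_nonneg (l : List Int) (h : ∀ x ∈ l, 0 ≤ x) :
    ((PySem.List.max? l (fun y => y)).getD 0) = l.foldl max 0 := by
  cases l with
  | nil => rfl
  | cons a rest =>
    rw [PySem.List.max?_id_cons]
    simp only [Option.getD_some]
    have ha : max 0 a = a := max_eq_right (h a (by simp))
    rw [List.foldl_cons, ha]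

lemma foldl_max_ite_skip (l : List Int) (p : Int -> Prop) [DecidablePred p] (g : Int -> Int) :
    forall b : Int, 0 <= b ->
      l.foldl (fun b t => max b (if p t then g t else 0)) b
        = l.foldl (fun b t => if p t then max b (g t) else b) b := by
  induction l with
  | nil => intro b _; rfl
  | cons t l ih =>
    intro b hb
    simp only [List.foldl_cons]
    by_cases hp : p t
    · rw [if_pos hp, if_pos hp]
      exact ih (max b (g t)) (le_trans hb (le_max_left _ _))
    · rw [if_neg hp, if_neg hp, max_eq_left hb]
      exact ih b hb

lemma optA_eq_fold (seq : List Int) (s e : Int) (h : ¬ s ≥ e - 4) :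
    optA seq s e = (PySem.List.pyRange s (e - 4) 1).foldl
      (fun b t => if PySem.List.pyGetD seq t 0 + PySem.List.pyGetD seq e 0 = 0
                  then max b (optA seq s (t - 1) + 1 + optA seq (t + 1) (e - 1)) else b)
      (optA seq s (e - 1)) := by
  conv_lhs => rw [optA]
  rw [if_neg h]
  show max (optA seq s (e-1)) ((PySem.List.max? ((PySem.List.pyRange s (e - 4) 1).attach.map (fun t =>
      if PySem.List.pyGetD seq t.1 0 + PySem.List.pyGetD seq e 0 = 0 then
        optA seq s (t.1 - 1) + 1 + optA seq (t.1 + 1) (e - 1)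
      else 0)) (fun y => y)).getD 0) = _
  simp only [List.map_attach_eq_pmap, List.pmap_eq_map]
  rw [getD_max?_nonneg]
  · rw [foldl_max_comm, max_eq_left (optA_nonneg seq s (e - 1)), List.foldl_map]
    exact foldl_max_ite_skip _ _ _ _ (optA_nonneg seq s (e - 1))
  · intro x hx
    obtain ⟨t, _, rfl⟩ := List.mem_map.mp hx
    split
    · have := optA_nonneg seq s (t - 1); have := optA_nonneg seq (t + 1) (e - 1); omega
    · exact le_rfl

def specRow (seq : List Int) (i : Int) : List Int :=
  (List.range seq.length).map (fun j : Nat => optA seq i (j : Int))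

def specTab (seq : List Int) : List (List Int) :=
  (List.range seq.length).map (fun x : Nat => specRow seq (x : Int))

def belowRows (seq : List Int) (I : Nat) : List (List Int) :=
  (List.range' I (seq.length - I)).map (fun x : Nat => specRow seq (x : Int))

lemma altCell_correct (seq : List Int) (i j : Int)
    (hi : 0 ≤ i) (hin : i < (seq.length : Int)) (hj : 0 ≤ j) (hjn : j < (seq.length : Int)) :
    altCell seq (belowRows seq (i.toNat + 1)) ((List.range j.toNat).map (fun y : Nat => optA seq i (y : Int))) i j
      = optA seq i j := by
  set n := seq.length with hn
  rw [altCell]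
  by_cases hb : i ≥ j - 4
  · rw [if_pos hb, optA_base seq i j hb]
  · rw [if_neg hb, optA_eq_fold seq i j hb]
    have hinit : PySem.List.pyGetD ((List.range j.toNat).map (fun y : Nat => optA seq i (y : Int))) (j - 1) 0
        = optA seq i (j - 1) := by
      rw [PySem.List.pyGetD_eq_getElem _ _ (by omega) (by simp; try omega)]
      simp only [List.getElem_map, List.getElem_range]
      congr 1
      omega
    rw [hinit]
    apply PySem.List.foldl_congr_mem
    intro acc t ht
    have htb := PySem.List.mem_pyRange_one.mp ht
    congr 1
    · -- left part
      have hleft : (if i < t then PySem.List.pyGetD ((List.range j.toNat).map (fun y : Nat => optA seq i (y : Int))) (t - 1) 0 else 0)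
          = optA seq i (t - 1) := by
        by_cases hit : i < t
        · rw [if_pos hit, PySem.List.pyGetD_eq_getElem _ _ (by omega) (by simp; try omega)]
          simp only [List.getElem_map, List.getElem_range]
          congr 1
          omega
        · rw [if_neg hit, optA_base seq i (t - 1) (by omega)]
      have hmid : PySem.List.pyGetD (PySem.List.pyGetD (belowRows seq (i.toNat + 1)) (t - i) []) (j - 1) 0
          = optA seq (t + 1) (j - 1) := by
        have h1 : PySem.List.pyGetD (belowRows seq (i.toNat + 1)) (t - i) [] = specRow seq (t + 1) := by
          rw [PySem.List.pyGetD_eq_getElem _ _ (by omega) (by simp [belowRows]; try omega)]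
          simp only [belowRows, List.getElem_map, List.getElem_range']
          congr 1
          omega
        rw [h1]
        rw [specRow, PySem.List.pyGetD_eq_getElem _ _ (by omega) (by simp; try omega)]
        simp only [List.getElem_map, List.getElem_range]
        congr 1
        omega
      rw [hleft, hmid]


lemma altRow_fold (seq : List Int) (i : Int) (hi : 0 ≤ i) (hin : i < (seq.length : Int)) :
    ∀ (m : Nat), m ≤ seq.length →
      (PySem.List.pyRange 0 (m : Int) 1).foldl
          (fun row j => row ++ [altCell seq (belowRows seq (i.toNat + 1)) row i j]) []
        = (List.range m).map (fun y : Nat => optA seq i (y : Int)) := by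
  intro m
  induction m with
  | zero => intro _; simp [PySem.List.pyRange_one_eq_nil]
  | succ m ih =>
    intro hm
    have hcast : ((m + 1 : Nat) : Int) = (m : Int) + 1 := by push_cast; ring
    rw [hcast, PySem.List.pyRange_one_succ_right (by positivity), List.foldl_append,
        ih (by omega), List.foldl_cons, List.foldl_nil]
    have hc := altCell_correct seq i (m : Int) hi hin (by positivity) (by exact_mod_cast hm)
    rw [show ((m : Int)).toNat = m from Int.toNat_natCast m] at hc
    rw [hc, List.range_succ, List.map_append]
    rfl

lemma altRow_correct (seq : List Int) (i : Int) (hi : 0 ≤ i) (hin : i < (seq.length : Int)) :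
    altRow seq (belowRows seq (i.toNat + 1)) i = specRow seq i := by
  rw [altRow, altRow_fold seq i hi hin seq.length le_rfl, specRow]

lemma outerB (seq : List Int) :
    ∀ (I : Nat), I ≤ seq.length →
      (PySem.List.pyRange ((I : Int) - 1) (-1) (-1)).foldl
          (fun rows i => altRow seq rows i :: rows) (belowRows seq I)
        = specTab seq := by
  intro I
  induction I with
  | zero =>
    intro _
    rw [PySem.List.pyRange_neg_one_eq_nil (by omega), List.foldl_nil]
    rw [belowRows, specTab, Nat.sub_zero, ← List.range_eq_range']
  | succ I ih =>
    intro hI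
    have hcast : ((I + 1 : Nat) : Int) - 1 = (I : Int) := by push_cast; ring
    rw [hcast, PySem.List.pyRange_neg_one_cons (by omega), List.foldl_cons]
    have hrows : belowRows seq (I + 1) = belowRows seq ((I : Int).toNat + 1) := by
      rw [Int.toNat_natCast]
    have hrow : altRow seq (belowRows seq (I + 1)) (I : Int) = specRow seq (I : Int) := by
      rw [hrows]
      exact altRow_correct seq (I : Int) (by positivity) (by exact_mod_cast hI)
    rw [hrow]
    have hstep : specRow seq (I : Int) :: belowRows seq (I + 1) = belowRows seq I := by
      rw [belowRows, belowRows]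
      have h1 : seq.length - I = (seq.length - (I + 1)) + 1 := by omega
      rw [h1, List.range'_succ, List.map_cons]
    rw [hstep]
    exact ih (by omega)

lemma pair_table_alt_eq_spec (seq : List Int) : pair_table_alt seq = specTab seq := by
  rw [pair_table_alt]
  have h0 : belowRows seq seq.length = [] := by
    rw [belowRows, Nat.sub_self]; rfl
  rw [← h0]
  exact outerB seq seq.length le_rfl

-- partially-filled table of A's double loop: cells with gap < K, plus gap = K for rows x < I, hold opt
def pt2 (seq : List Int) (K I : Int) : List (List Int) :=
  (List.range seq.length).map (fun x : Nat => (List.range seq.length).map (fun y : Nat =>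
    if ((y : Int) - (x : Int) < K) ∨ ((y : Int) - (x : Int) = K ∧ (x : Int) < I)
    then optA seq (x : Int) (y : Int) else 0))

lemma init_eq (seq : List Int) :
    (List.range seq.length).map (fun _ => (List.range seq.length).map (fun _ => (0 : Int)))
      = pt2 seq 4 0 := by
  apply List.ext_getElem (by simp [pt2])
  intro x h1 h2
  apply List.ext_getElem (by simp [pt2])
  intro y g1 g2
  simp only [pt2, List.getElem_map, List.getElem_range]
  split
  · next hc =>
    rw [optA_base seq (x : Int) (y : Int) (by omega)]
  · rfl

lemma innerStep (seq : List Int) (k i : Int) (hk : 4 ≤ k) (hi : 0 ≤ i) :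
    (pt2 seq k i).modify i.toNat (fun r => r.set (i + k).toNat (optA seq i (i + k)))
      = pt2 seq k (i + 1) := by
  have hii : ((i.toNat : Nat) : Int) = i := Int.toNat_of_nonneg hi
  have hikk : (((i + k).toNat : Nat) : Int) = i + k := Int.toNat_of_nonneg (by omega)
  apply List.ext_getElem (by simp [pt2])
  intro x h1 h2
  have hxn : x < seq.length := by simpa [pt2] using h2
  rw [List.getElem_modify]
  by_cases hx : i.toNat = x
  · rw [if_pos hx]
    simp only [pt2, List.getElem_map, List.getElem_range]
    apply List.ext_getElem (by simp)
    intro y g1 g2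
    have hyn : y < seq.length := by simpa using g2
    rw [List.getElem_set]
    simp only [List.getElem_map, List.getElem_range]
    by_cases hy : (i + k).toNat = y
    · rw [if_pos hy, if_pos (by omega)]
      congr 1 <;> omega
    · rw [if_neg hy]
      have : (((y : Int) - (x : Int) < k) ∨ ((y : Int) - (x : Int) = k ∧ (x : Int) < i))
           ↔ (((y : Int) - (x : Int) < k) ∨ ((y : Int) - (x : Int) = k ∧ (x : Int) < i + 1)) := by
        omega
      rw [if_congr this rfl rfl]
  · rw [if_neg hx]
    simp only [pt2, List.getElem_map, List.getElem_range]
    apply List.ext_getElem (by simp)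
    intro y g1 g2
    simp only [List.getElem_map, List.getElem_range]
    have : (((y : Int) - (x : Int) < k) ∨ ((y : Int) - (x : Int) = k ∧ (x : Int) < i))
         ↔ (((y : Int) - (x : Int) < k) ∨ ((y : Int) - (x : Int) = k ∧ (x : Int) < i + 1)) := by
      omega
    rw [if_congr this rfl rfl]

lemma innerFold (seq : List Int) (k : Int) (hk : 4 ≤ k) :
    ∀ (m : Nat), (m : Int) + k ≤ (seq.length : Int) →
      (PySem.List.pyRange 0 (m : Int) 1).foldl
          (fun table i => table.modify i.toNat (fun r => r.set (i + k).toNat (optA seq i (i + k))))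
          (pt2 seq k 0)
        = pt2 seq k (m : Int) := by
  intro m
  induction m with
  | zero => intro _; simp [PySem.List.pyRange_one_eq_nil]
  | succ m ih =>
    intro hm
    have hcast : ((m + 1 : Nat) : Int) = (m : Int) + 1 := by push_cast; ring
    rw [hcast, PySem.List.pyRange_one_succ_right (by positivity), List.foldl_append,
        ih (by push_cast at hm ⊢; omega), List.foldl_cons, List.foldl_nil]
    exact innerStep seq k (m : Int) hk (by positivity)

lemma shiftK (seq : List Int) (k : Int) :
    pt2 seq k ((seq.length : Int) - k) = pt2 seq (k + 1) 0 := by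
  apply List.ext_getElem (by simp [pt2])
  intro x h1 h2
  have hxn : x < seq.length := by simpa [pt2] using h2
  simp only [pt2, List.getElem_map, List.getElem_range]
  apply List.ext_getElem (by simp)
  intro y g1 g2
  have hyn : y < seq.length := by simpa using g2
  simp only [List.getElem_map, List.getElem_range]
  have : (((y : Int) - (x : Int) < k) ∨ ((y : Int) - (x : Int) = k ∧ (x : Int) < (seq.length : Int) - k))
       ↔ (((y : Int) - (x : Int) < k + 1) ∨ ((y : Int) - (x : Int) = k + 1 ∧ (x : Int) < 0)) := by
    have hx' : (x : Int) < (seq.length : Int) := by exact_mod_cast hxn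
    have hy' : (y : Int) < (seq.length : Int) := by exact_mod_cast hyn
    omega
  rw [if_congr this rfl rfl]

lemma outerA (seq : List Int) :
    ∀ (m : Nat), 4 ≤ m → m ≤ seq.length →
      (PySem.List.pyRange 4 (m : Int) 1).foldl (fun table k =>
        (PySem.List.pyRange 0 ((seq.length : Int) - k) 1).foldl (fun table i =>
          table.modify i.toNat (fun r => r.set (i + k).toNat (optA seq i (i + k)))) table)
        (pt2 seq 4 0)
        = pt2 seq (m : Int) 0 := by
  intro m hm4 hmn
  induction m, hm4 using Nat.le_induction with
  | base => simp [PySem.List.pyRange_one_eq_nil]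
  | succ m hm4 ih =>
    have hcast : ((m + 1 : Nat) : Int) = (m : Int) + 1 := by push_cast; ring
    rw [hcast, PySem.List.pyRange_one_succ_right (by exact_mod_cast hm4), List.foldl_append,
        ih (by omega), List.foldl_cons, List.foldl_nil]
    have hnm : ((seq.length - m : Nat) : Int) = (seq.length : Int) - (m : Int) := by
      have : m ≤ seq.length := by omega
      push_cast [this]; ring
    rw [← hnm, innerFold seq (m : Int) (by exact_mod_cast hm4) (seq.length - m)
          (by rw [hnm]; ring_nf; omega), hnm]
    rw [shiftK seq (m : Int), ← hcast]

lemma pt2_eq_spec (seq : List Int) (K : Int)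
    (hK : ∀ x y : Nat, x < seq.length → y < seq.length → (y : Int) - (x : Int) < K) :
    pt2 seq K 0 = specTab seq := by
  apply List.ext_getElem (by simp [pt2, specTab])
  intro x h1 h2
  have hxn : x < seq.length := by simpa [pt2] using h1
  simp only [pt2, specTab, specRow, List.getElem_map, List.getElem_range]
  apply List.ext_getElem (by simp)
  intro y g1 g2
  have hyn : y < seq.length := by simpa using g2
  simp only [List.getElem_map, List.getElem_range]
  rw [if_pos (Or.inl (hK x y hxn hyn))]

lemma pair_table_unfold (seq : List Int) :
    pair_table seq = (PySem.List.pyRange 4 ((seq.length : Int)) 1).foldl (fun table k =>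
        (PySem.List.pyRange 0 ((seq.length : Int) - k) 1).foldl (fun table i =>
          table.modify i.toNat (fun r => r.set (i + k).toNat (optA seq i (i + k)))) table)
      ((List.range seq.length).map (fun _ => (List.range seq.length).map (fun _ => (0 : Int)))) := rfl

lemma pair_table_eq_spec (seq : List Int) : pair_table seq = specTab seq := by
  rw [pair_table_unfold, init_eq]
  by_cases hn : seq.length ≤ 4
  · rw [PySem.List.pyRange_one_eq_nil (by exact_mod_cast hn), List.foldl_nil]
    exact pt2_eq_spec seq 4 (fun x y hx hy => by
      have hx' : (0 : Int) ≤ (x : Int) := by positivity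
      have hy' : (y : Int) < (seq.length : Int) := by exact_mod_cast hy
      have hn' : (seq.length : Int) ≤ 4 := by exact_mod_cast hn
      omega)
  · rw [outerA seq seq.length (by omega) le_rfl]
    exact pt2_eq_spec seq (seq.length : Int) (fun x y hx hy => by
      have hx' : (0 : Int) ≤ (x : Int) := by positivity
      have hy' : (y : Int) < (seq.length : Int) := by exact_mod_cast hy
      omega)

-- ===== VERDICT (by name: the statement is the Claim_ definition above) =====
theorem pair_table_spec : Claim_equal_pair_table := by
  intro seq _
  unfold Spec_pair_table
  rw [pair_table_eq_spec, pair_table_alt_eq_spec]
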